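-- pv_equiv track=rewrite | github.com/shadmehrbahman/My-Not-Acm-Repository | Sorts/Insertion_sort_For_Words.py | sort_two_words
-- ===== SOURCE A (Python) =====
-- def sort_two_words(first, second, i = 0):
--     if i == len(first):
--         return True
--     elif i == len(second):
--         return False
--     if first[i] < second[i]:
--         return True
--     elif first[i] > second[i]:
--         return False
--     elif first[i] == second[i]:
--         return sort_two_words(first, second, i + 1)
-- ===== SOURCE B (Python) =====
-- def sort_two_words(first, second, i=0):
--     while i != len(first) and i != len(second) and first[i] == second[i]:
--         i += 1
--     if i == len(first):
--         return True
--     if i == len(second):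
--         return False
--     return first[i] < second[i]
-- ===== Notes on version B (the rewrite author's own statement) =====
-- stated objective: simpler
-- what changed: Replaces A's four-way recursive branch cascade with a single iterative find-first-mismatch loop followed by one three-way decision on the stopping index.
import Mathlib
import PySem

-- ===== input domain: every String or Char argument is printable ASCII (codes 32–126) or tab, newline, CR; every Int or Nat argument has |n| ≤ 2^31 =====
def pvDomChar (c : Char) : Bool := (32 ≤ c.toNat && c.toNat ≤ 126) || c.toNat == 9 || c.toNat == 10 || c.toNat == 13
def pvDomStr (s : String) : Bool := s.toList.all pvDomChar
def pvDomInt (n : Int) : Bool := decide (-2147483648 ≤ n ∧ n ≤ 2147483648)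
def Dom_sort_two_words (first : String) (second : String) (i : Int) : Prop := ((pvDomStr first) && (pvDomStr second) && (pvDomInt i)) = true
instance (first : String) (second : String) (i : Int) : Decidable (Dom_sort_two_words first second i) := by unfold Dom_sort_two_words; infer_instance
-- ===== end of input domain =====

-- B replaces A's four-way recursive branch cascade by a single find-first-mismatch
-- loop followed by one three-way decision (objective: simpler / iterative).

-- termination helper: a successful pyGet? bounds the index (cited by decreasing_by)
theorem pvGetSomeLt {α : Type} (xs : List α) (i : Int) (a : α)
    (h : PySem.List.pyGet? xs i = some a) : i < (xs.length : Int) := by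
  by_cases hr : PySem.Raise.InRange xs.length i
  · exact hr.2
  · rw [(PySem.List.pyGet?_eq_none_iff xs i).mpr hr] at h; cases h

-- ===== PORT A =====
def sort_two_words (first : String) (second : String) (i : Int) : Bool :=
  if i = (first.toList.length : Int) then true
  else if i = (second.toList.length : Int) then false
  else
    match h1 : PySem.List.pyGet? first.toList i, PySem.List.pyGet? second.toList i with
    | some a, some b =>
        if a < b then true
        else if b < a then false
        else sort_two_words first second (i + 1)   -- first[i] == second[i]
    | _, _ => false                                -- IndexError in Python (outside Pre_)
termination_by ((first.toList.length : Int) - i).toNat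
decreasing_by
  have := pvGetSomeLt first.toList i a h1
  omega

-- ===== PORT B =====
-- the while-loop of Source B: advance i while both indices are short of their length and the chars agree
-- (the nested matches mirror the short-circuit evaluation order of the and-chain)
def stwScan (f : List Char) (s : List Char) (i : Int) : Int :=
  if i = (f.length : Int) ∨ i = (s.length : Int) then i
  else
    match h1 : PySem.List.pyGet? f i with
    | none => i                                    -- IndexError in Python (outside Pre_)
    | some a =>
      match PySem.List.pyGet? s i with
      | none => i                                  -- IndexError in Python (outside Pre_)
      | some b => if a = b then stwScan f s (i + 1) else i
termination_by ((f.length : Int) - i).toNat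
decreasing_by
  have := pvGetSomeLt f i a h1
  omega

def sort_two_words_alt (first : String) (second : String) (i : Int) : Bool :=
  let j := stwScan first.toList second.toList i
  if j = (first.toList.length : Int) then true
  else if j = (second.toList.length : Int) then false
  else
    match PySem.List.pyGet? first.toList j with
    | none => false                                -- IndexError in Python (outside Pre_)
    | some a =>
      match PySem.List.pyGet? second.toList j with
      | none => false                              -- IndexError in Python (outside Pre_)
      | some b => decide (a < b)

-- ===== PRECONDITION & SPEC =====
-- Pre_ excludes exactly the inputs on which both Pythons raise IndexError: a
-- caller-supplied i that is out of range for one string without equalling either length.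
def Pre_sort_two_words (first : String) (second : String) (i : Int) : Prop :=
  (0 ≤ i ∧ ((i ≤ (first.toList.length : Int) ∧ i ≤ (second.toList.length : Int))
            ∨ i = (first.toList.length : Int) ∨ i = (second.toList.length : Int)))
  ∨ (i < 0 ∧ -i ≤ (first.toList.length : Int) ∧ -i ≤ (second.toList.length : Int))
instance (first : String) (second : String) (i : Int) : Decidable (Pre_sort_two_words first second i) := by unfold Pre_sort_two_words; infer_instance

def pvWitness_sort_two_words : String × String × Int := ("ab", "ac", 0)

def Spec_sort_two_words (first : String) (second : String) (i : Int) (out : Bool) : Prop := out = sort_two_words_alt first second i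
instance (first : String) (second : String) (i : Int) (out : Bool) : Decidable (Spec_sort_two_words first second i out) := by unfold Spec_sort_two_words; infer_instance

-- ===== CLAIM (what is proved, stated in full; the proofs are below) =====
def Claim_equal_sort_two_words : Prop := ∀ (first : String) (second : String) (i : Int), Dom_sort_two_words first second i → Pre_sort_two_words first second i → Spec_sort_two_words first second i (sort_two_words first second i)

-- ===== LEMMAS AND PROOFS =====

-- one step of Source B's loop when both characters exist
theorem stwScan_step (f : List Char) (s : List Char) (i : Int) (a : Char) (b : Char)
    (hf : ¬ i = (f.length : Int)) (hs : ¬ i = (s.length : Int))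
    (h1 : PySem.List.pyGet? f i = some a) (h2 : PySem.List.pyGet? s i = some b) :
    stwScan f s i = if a = b then stwScan f s (i + 1) else i := by
  rw [stwScan, if_neg (fun h => h.elim hf hs)]
  split
  · rename_i h1'
    rw [h1] at h1'
    cases h1'
  · rename_i a' h1'
    rw [h1] at h1'
    obtain rfl : a' = a := (Option.some.inj h1').symm
    rw [h2]

-- the two ports agree on every input (the fallback branches align where Python raises)
theorem stw_eq (first : String) (second : String) (i : Int) :
    sort_two_words first second i = sort_two_words_alt first second i := by
  fun_induction sort_two_words first second i with
  | case1 =>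
      simp only [sort_two_words_alt]
      rw [stwScan]
      simp_all
  | case2 =>
      simp only [sort_two_words_alt]
      rw [stwScan]
      simp_all
  | case3 =>
      rename_i i hf hs a b h1 h2 hlt
      simp only [sort_two_words_alt]
      rw [stwScan_step first.toList second.toList i a b hf hs h1 h2]
      simp_all [ne_of_lt hlt]
  | case4 =>
      rename_i i hf hs a b h1 h2 hlt hgt
      simp only [sort_two_words_alt]
      rw [stwScan_step first.toList second.toList i a b hf hs h1 h2]
      simp_all [(ne_of_lt hgt).symm, not_lt_of_gt hgt]
  | case5 =>
      rename_i i hf hs a b h1 h2 hlt hgt ih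
      have hab : a = b := le_antisymm (not_lt.mp hgt) (not_lt.mp hlt)
      subst hab
      rw [ih]
      simp only [sort_two_words_alt]
      rw [stwScan_step first.toList second.toList i a a hf hs h1 h2]
      simp
  | case6 =>
      rename_i i hf hs hno
      simp only [sort_two_words_alt]
      rw [stwScan]
      rcases hg1 : PySem.List.pyGet? first.toList i with _ | a
      · simp_all
      · rcases hg2 : PySem.List.pyGet? second.toList i with _ | b
        · simp_all
        · exact absurd (hno a b hg1 hg2) (by simp)

-- ===== VERDICT (by name: the statement is the Claim_ definition above) =====
theorem sort_two_words_spec : Claim_equal_sort_two_words := by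
  intro first second i _ _
  unfold Spec_sort_two_words
  exact stw_eq first second i
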